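-- pv_equiv track=rewrite | github.com/CodingProgrammer/HackerRank_Python | (Implementation)Manasa_and_Stones.py | stones
-- ===== SOURCE A (Python) =====
-- def stones(n, a, b):
--     result = set()
--     i = 0
--     while i < n:
--         num_a = n - 1 - i
--         num_b = n - 1 - num_a
--         result.add(num_a * a + num_b * b)
--         i += 1
--     return sorted(result)
-- ===== SOURCE B (Python) =====
-- def stones(n, a, b):
--     if n <= 0:
--         return []
--     base = (n - 1) * a
--     d = b - a
--     if d == 0:
--         return [base]
--     vals = [base + i * d for i in range(n)]
--     return vals if d > 0 else vals[::-1]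
-- ===== Notes on version B (the rewrite author's own statement) =====
-- stated objective: faster
-- what changed: A builds a hash set of the n progression values one by one and then sorts it; B recognizes the values form an arithmetic progression with step b-a and emits the sorted list directly (single value if a==b, ascending range if b>a, reversed range if b<a), with no set and no sort.
import Mathlib
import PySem

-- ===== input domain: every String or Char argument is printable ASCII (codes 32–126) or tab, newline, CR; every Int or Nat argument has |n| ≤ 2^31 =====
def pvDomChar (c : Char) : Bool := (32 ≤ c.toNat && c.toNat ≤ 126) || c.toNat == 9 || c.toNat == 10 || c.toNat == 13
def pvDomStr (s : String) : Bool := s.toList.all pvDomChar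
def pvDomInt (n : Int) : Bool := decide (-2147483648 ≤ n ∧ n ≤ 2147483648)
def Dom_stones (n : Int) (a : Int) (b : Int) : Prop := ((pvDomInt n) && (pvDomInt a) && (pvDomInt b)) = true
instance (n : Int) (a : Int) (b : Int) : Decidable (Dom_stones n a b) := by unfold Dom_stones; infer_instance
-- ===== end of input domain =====

-- B replaces A's set-build-then-sort with a direct emission of the arithmetic
-- progression (ascending for b > a, reversed for b < a, single value for a = b): faster.

-- ===== PORT A =====
-- while i < n: runs exactly n.toNat times; fuel counts the remaining iterations.
def stonesLoop (n : Int) (a : Int) (b : Int) : Nat → Int → PySem.Set Int → PySem.Set Int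
  | 0, _, s => s
  | fuel + 1, i, s =>
      let num_a := n - 1 - i
      let num_b := n - 1 - num_a
      stonesLoop n a b fuel (i + 1) (PySem.Set.add s (num_a * a + num_b * b))

def stones (n : Int) (a : Int) (b : Int) : List Int :=
  PySem.List.sorted (stonesLoop n a b n.toNat 0 PySem.Set.empty) (fun x => x) false

-- ===== PORT B =====
-- vals[::-1] is List.reverse (PySem.List.slice?_none_none_neg_one).
def stones_alt (n : Int) (a : Int) (b : Int) : List Int :=
  if n ≤ 0 then []
  else
    let base := (n - 1) * a
    let d := b - a
    if d = 0 then [base]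
    else
      let vals := (PySem.List.pyRange 0 n 1).map (fun i => base + i * d)
      if d > 0 then vals else vals.reverse

-- ===== PRECONDITION & SPEC =====
def Spec_stones (n : Int) (a : Int) (b : Int) (out : List Int) : Prop := out = stones_alt n a b
instance (n : Int) (a : Int) (b : Int) (out : List Int) : Decidable (Spec_stones n a b out) := by unfold Spec_stones; infer_instance

-- ===== CLAIM (what is proved, stated in full; the proofs are below) =====
def Claim_equal_stones : Prop := ∀ (n : Int) (a : Int) (b : Int), Dom_stones n a b → Spec_stones n a b (stones n a b)

-- ===== LEMMAS AND PROOFS =====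

-- The loop with fuel f starting at i folds Set.add over the values on range(i, i+f).
theorem stonesLoop_eq_foldl (n a b : Int) (f : Nat) (i : Int) (s : PySem.Set Int) :
    stonesLoop n a b f i s =
      ((PySem.List.pyRange i (i + f) 1).map
        (fun j => (n - 1) * a + j * (b - a))).foldl PySem.Set.add s := by
  induction f generalizing i s with
  | zero => simp [stonesLoop, PySem.List.pyRange_one_eq_nil]
  | succ f ih =>
      rw [stonesLoop, ih]
      rw [PySem.List.pyRange_one_cons (by omega : i < i + (f + 1 : Nat))]
      simp only [List.map_cons, List.foldl_cons]
      have h1 : (i + 1) + (f : Int) = i + ((f : Nat) + 1 : Nat) := by push_cast; ring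
      rw [h1]
      congr 2
      ring

theorem foldl_add_disjoint {α : Type} [BEq α] [LawfulBEq α] (xs : List α) :
    ∀ (s : List α), (∀ x ∈ xs, x ∉ s) → xs.Nodup → xs.foldl PySem.Set.add s = s ++ xs := by
  induction xs with
  | nil => intro s _ _; simp
  | cons x t ih =>
      intro s hdisj hnd
      have hxs : x ∉ s := hdisj x (by simp)
      have hadd : PySem.Set.add s x = s ++ [x] := by
        simp [PySem.Set.add, PySem.Set.contains, hxs]
      rw [List.foldl_cons, hadd, ih (s ++ [x])
        (by
          intro y hy
          simp only [List.mem_append, List.mem_singleton]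
          push Not
          refine ⟨hdisj y (by simp [hy]), ?_⟩
          intro hyx
          exact (List.nodup_cons.mp hnd).1 (hyx ▸ hy))
        (List.nodup_cons.mp hnd).2]
      simp

theorem ofList_eq_self_of_nodup {α : Type} [BEq α] [LawfulBEq α] (xs : List α)
    (h : xs.Nodup) : PySem.Set.ofList xs = xs := by
  have := foldl_add_disjoint xs [] (by simp) h
  simpa [PySem.Set.ofList_eq_foldl] using this

theorem ofList_const {α : Type} [BEq α] [LawfulBEq α] (l : List α) (c : α) (h : l ≠ []) :
    PySem.Set.ofList (l.map (fun _ => c)) = [c] := by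
  induction l with
  | nil => exact absurd rfl h
  | cons x t ih =>
      cases t with
      | nil => simp [PySem.Set.ofList_eq_foldl, PySem.Set.add, PySem.Set.contains]
      | cons y u =>
          have h2 := ih (by simp)
          simp only [PySem.Set.ofList_eq_foldl, List.map_cons, List.foldl_cons] at h2 ⊢
          have e1 : PySem.Set.add ([] : List α) c = [c] := by
            simp [PySem.Set.add, PySem.Set.contains]
          have e2 : PySem.Set.add [c] c = [c] := by
            simp [PySem.Set.add, PySem.Set.contains]
          rw [e1] at h2 ⊢
          rw [e2]
          exact h2

theorem stones_spec' : ∀ (n a b : Int), stones n a b = stones_alt n a b := by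
  intro n a b
  unfold stones stones_alt
  rw [stonesLoop_eq_foldl]
  by_cases hn : n ≤ 0
  · have : n.toNat = 0 := by omega
    rw [this]
    simp [PySem.List.pyRange_one_eq_nil, PySem.Set.empty, hn, PySem.List.sorted]
  · have hcast : (0 : Int) + (n.toNat : Int) = n := by omega
    rw [hcast]
    have hfold : ((PySem.List.pyRange 0 n 1).map
        (fun j => (n - 1) * a + j * (b - a))).foldl PySem.Set.add PySem.Set.empty =
        PySem.Set.ofList ((PySem.List.pyRange 0 n 1).map (fun j => (n - 1) * a + j * (b - a))) := by
      rw [PySem.Set.ofList_eq_foldl]; rfl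
    rw [hfold]
    simp only [if_neg hn]
    set L := (PySem.List.pyRange 0 n 1).map (fun j => (n - 1) * a + j * (b - a)) with hL
    by_cases hd : b - a = 0
    · -- constant list
      have hLc : L = (PySem.List.pyRange 0 n 1).map (fun _ => (n - 1) * a) := by
        rw [hL]; apply List.map_congr_left; intro j _; rw [hd]; ring
      have hne : PySem.List.pyRange 0 n 1 ≠ [] := by
        have : (0:Int) < n := by omega
        rw [PySem.List.pyRange_one_cons this]; simp
      rw [hLc, ofList_const _ _ hne, if_pos hd]
      exact PySem.List.sorted_eq_of_perm_of_pairwise_lt _ _ _ (List.Perm.refl _)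
        (List.pairwise_singleton _ _)
    · have hpw : ∀ {R : Int → Int → Prop}, (∀ x y : Int, x < y → R ((n-1)*a + x*(b-a)) ((n-1)*a + y*(b-a))) →
          L.Pairwise R := by
        intro R hmono
        rw [hL]
        exact List.Pairwise.map _ (fun x y hxy => hmono x y hxy)
          (PySem.List.pairwise_lt_pyRange_one 0 n)
      rw [if_neg hd]
      by_cases hpos : b - a > 0
      · have hlt : L.Pairwise (· < ·) := hpw (by
          intro x y hxy
          have := mul_lt_mul_of_pos_right hxy hpos
          linarith)
        rw [ofList_eq_self_of_nodup _ hlt.nodup, if_pos hpos]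
        exact PySem.List.sorted_eq_of_perm_of_pairwise_lt _ _ _ (List.Perm.refl _) hlt
      · have hdneg : b - a < 0 := by omega
        have hgt : L.Pairwise (fun x y => y < x) := hpw (by
          intro x y hxy
          have := mul_lt_mul_of_neg_right hxy hdneg
          linarith)
        have hlt' : L.reverse.Pairwise (· < ·) := by
          rw [List.pairwise_reverse]; exact hgt
        rw [ofList_eq_self_of_nodup _ (by rw [← List.nodup_reverse]; exact hlt'.nodup), if_neg hpos]
        exact PySem.List.sorted_eq_of_perm_of_pairwise_lt _ _ _ (List.reverse_perm L) hlt'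
-- ===== VERDICT (by name: the statement is the Claim_ definition above) =====
theorem stones_spec : Claim_equal_stones := by
  intro n a b _
  unfold Spec_stones
  exact stones_spec' n a b
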